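-- pv_equiv track=rewrite | github.com/bartulem/usv-playpen | src/usv_playpen/visualizations/auxiliary_plot_functions (2).py | choose_animal_colors
-- ===== SOURCE A (Python) =====
-- def choose_animal_colors(
--     exp_info_dict: dict | None = None, visualizations_parameter_dict: dict | None = None
-- ) -> list | None:
--     """
--     Selects colors for male and female mice.
--
--     Parameters
--     ----------
--     exp_info_dict (dict)
--         Information about the experiment.
--     visualizations_parameter_dict (dict)
--         Information about the male/female color scheme.
--
--     Returns
--     -------
--     mouse_colors (list)
--         Chosen mouse colors in sequence.
--     """
--
--     mouse_colors = []
--     n_males = 0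
--     n_females = 0
--     for sex_idx, sex in enumerate(exp_info_dict["mouse_sex"]):
--         if sex == "male":
--             mouse_colors.append(visualizations_parameter_dict["male_colors"][n_males])
--             n_males += 1
--         else:
--             mouse_colors.append(
--                 visualizations_parameter_dict["female_colors"][n_females]
--             )
--             n_females += 1
--
--     return mouse_colors
-- ===== SOURCE B (Python) =====
-- def choose_animal_colors(
--     exp_info_dict: dict | None = None, visualizations_parameter_dict: dict | None = None
-- ) -> list | None:
--     """Group indices by sex, then scatter each color list onto its positions."""
--     sexes = exp_info_dict["mouse_sex"]
--     male_positions = [i for i, s in enumerate(sexes) if s == "male"]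
--     female_positions = [i for i, s in enumerate(sexes) if s != "male"]
--     mouse_colors = [None] * len(sexes)
--     for k, i in enumerate(male_positions):
--         mouse_colors[i] = visualizations_parameter_dict["male_colors"][k]
--     for k, i in enumerate(female_positions):
--         mouse_colors[i] = visualizations_parameter_dict["female_colors"][k]
--     return mouse_colors
-- ===== Notes on version B (the rewrite author's own statement) =====
-- stated objective: alternative
-- what changed: Replaces A's single interleaved pass with two running counters by a group-by-sex strategy: collect male and female index positions, preallocate the output, and scatter each color list onto its positions.
import Mathlib
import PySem

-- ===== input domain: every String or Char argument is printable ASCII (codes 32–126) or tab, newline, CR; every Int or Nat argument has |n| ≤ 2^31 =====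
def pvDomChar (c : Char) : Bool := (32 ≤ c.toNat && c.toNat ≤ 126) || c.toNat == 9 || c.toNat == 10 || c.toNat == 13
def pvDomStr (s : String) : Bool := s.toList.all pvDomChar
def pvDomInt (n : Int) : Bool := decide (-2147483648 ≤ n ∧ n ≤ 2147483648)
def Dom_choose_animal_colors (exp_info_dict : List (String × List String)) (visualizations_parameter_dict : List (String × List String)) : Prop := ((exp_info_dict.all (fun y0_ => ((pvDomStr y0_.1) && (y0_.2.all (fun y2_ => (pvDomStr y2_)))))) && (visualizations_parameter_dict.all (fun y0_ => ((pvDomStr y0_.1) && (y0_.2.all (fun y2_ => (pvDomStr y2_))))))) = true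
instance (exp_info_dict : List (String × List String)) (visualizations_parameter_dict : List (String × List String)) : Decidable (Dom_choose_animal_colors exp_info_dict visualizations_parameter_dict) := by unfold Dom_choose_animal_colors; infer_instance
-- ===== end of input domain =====

-- B groups the indices by sex and scatters each color list onto its positions, instead of A's
-- single interleaved pass with two running counters; same cost, different decomposition (objective: alternative).

-- ===== PORT A =====
-- dict[key] / list[idx] raise KeyError/IndexError in Python; the '.getD' defaults are reached
-- only outside Pre_choose_animal_colors, which excludes exactly those raising inputs.
def choose_animal_colors (exp_info_dict : List (String × List String)) (visualizations_parameter_dict : List (String × List String)) : List String :=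
  let sexes := ((PySem.Dict.mk exp_info_dict).get? "mouse_sex").getD []
  let st := sexes.foldl (fun (st : List String × Nat × Nat) (sex : String) =>
    if sex == "male" then
      (st.1 ++ [(PySem.List.pyGet? (((PySem.Dict.mk visualizations_parameter_dict).get? "male_colors").getD []) (st.2.1 : Int)).getD ""], st.2.1 + 1, st.2.2)
    else
      (st.1 ++ [(PySem.List.pyGet? (((PySem.Dict.mk visualizations_parameter_dict).get? "female_colors").getD []) (st.2.2 : Int)).getD ""], st.2.1, st.2.2 + 1))
    ([], 0, 0)
  st.1

-- ===== PORT B =====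
-- transliteration of Source B; 'mouse_colors[i] = …' is PySem.List.pySetD (i is always in range here),
-- [None]*n is List.replicate n "" (every slot is overwritten inside Pre_), and the color-list
-- indexing colors[k] over k = 0,1,… is the zip with the positions list (IndexError only outside Pre_).
def bScatter (l : List String) (pairs : List (Int × String)) : List String :=
  pairs.foldl (fun l pc => PySem.List.pySetD l pc.1 pc.2) l

def choose_animal_colors_alt (exp_info_dict : List (String × List String)) (visualizations_parameter_dict : List (String × List String)) : List String :=
  let sexes := ((PySem.Dict.mk exp_info_dict).get? "mouse_sex").getD []
  let male_positions := ((PySem.List.enumerate sexes 0).filter (fun p => p.2 == "male")).map Prod.fst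
  let female_positions := ((PySem.List.enumerate sexes 0).filter (fun p => p.2 != "male")).map Prod.fst
  let mc := ((PySem.Dict.mk visualizations_parameter_dict).get? "male_colors").getD []
  let fc := ((PySem.Dict.mk visualizations_parameter_dict).get? "female_colors").getD []
  bScatter (bScatter (List.replicate sexes.length "") (male_positions.zip mc)) (female_positions.zip fc)

-- ===== PRECONDITION & SPEC =====
-- Pre_ excludes exactly the inputs where Python A raises: a missing "mouse_sex" key (KeyError),
-- and color lists shorter than the number of mice of that sex (IndexError / missing color key with
-- at least one mouse of that sex, KeyError).
def Pre_choose_animal_colors (exp_info_dict : List (String × List String)) (visualizations_parameter_dict : List (String × List String)) : Prop :=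
  ((PySem.Dict.mk exp_info_dict).get? "mouse_sex").isSome ∧
  (((PySem.Dict.mk exp_info_dict).get? "mouse_sex").getD []).countP (· == "male") ≤ (((PySem.Dict.mk visualizations_parameter_dict).get? "male_colors").getD []).length ∧
  (((PySem.Dict.mk exp_info_dict).get? "mouse_sex").getD []).countP (· != "male") ≤ (((PySem.Dict.mk visualizations_parameter_dict).get? "female_colors").getD []).length
instance (exp_info_dict : List (String × List String)) (visualizations_parameter_dict : List (String × List String)) : Decidable (Pre_choose_animal_colors exp_info_dict visualizations_parameter_dict) := by unfold Pre_choose_animal_colors; infer_instance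

def pvWitness_choose_animal_colors : (List (String × List String)) × (List (String × List String)) :=
  ([("mouse_sex", ["male", "female"])], [("male_colors", ["#00ccff"]), ("female_colors", ["#ff6699"])])

def Spec_choose_animal_colors (exp_info_dict : List (String × List String)) (visualizations_parameter_dict : List (String × List String)) (out : List String) : Prop := out = choose_animal_colors_alt exp_info_dict visualizations_parameter_dict
instance (exp_info_dict : List (String × List String)) (visualizations_parameter_dict : List (String × List String)) (out : List String) : Decidable (Spec_choose_animal_colors exp_info_dict visualizations_parameter_dict out) := by unfold Spec_choose_animal_colors; infer_instance

-- ===== CLAIM (what is proved, stated in full; the proofs are below) =====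
def Claim_equal_choose_animal_colors : Prop := ∀ (exp_info_dict : List (String × List String)) (visualizations_parameter_dict : List (String × List String)), Dom_choose_animal_colors exp_info_dict visualizations_parameter_dict → Pre_choose_animal_colors exp_info_dict visualizations_parameter_dict → Spec_choose_animal_colors exp_info_dict visualizations_parameter_dict (choose_animal_colors exp_info_dict visualizations_parameter_dict)

-- ===== LEMMAS AND PROOFS =====

-- Reference shape both ports are reduced to: walk the sexes, consuming one color stream per sex.
def interleave : List String → List String → List String → List String
  | [], _, _ => []
  | s :: r, mc, fc =>
    if s == "male" then mc.headD "" :: interleave r mc.tail fc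
    else fc.headD "" :: interleave r mc fc.tail

lemma a_fold_eq (sexes mc fc : List String) : ∀ (acc : List String) (m f : Nat),
    (sexes.foldl (fun (st : List String × Nat × Nat) (sex : String) =>
      if sex == "male" then
        (st.1 ++ [(PySem.List.pyGet? mc (st.2.1 : Int)).getD ""], st.2.1 + 1, st.2.2)
      else
        (st.1 ++ [(PySem.List.pyGet? fc (st.2.2 : Int)).getD ""], st.2.1, st.2.2 + 1))
      (acc, m, f)).1 = acc ++ interleave sexes (mc.drop m) (fc.drop f) := by
  induction sexes with
  | nil => intro acc m f; simp [interleave]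
  | cons s r ih =>
    intro acc m f
    by_cases hs : s == "male" <;>
      simp only [List.foldl_cons, hs, if_pos, if_neg, interleave, Bool.false_eq_true,
        not_false_iff, ih] <;>
      simp [← List.head?_drop, Option.getD, List.tail_drop]

lemma pySetD_cons_succ (x c : String) (l : List String) (p : Int) (hp : 0 ≤ p) :
    PySem.List.pySetD (x :: l) (p + 1) c = x :: PySem.List.pySetD l p c := by
  rw [PySem.List.pySetD_of_nonneg _ _ (by omega : (0:Int) ≤ p + 1), PySem.List.pySetD_of_nonneg _ _ hp]
  have : (p + 1).toNat = p.toNat + 1 := by omega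
  simp [this]

lemma bScatter_shift (x : String) (pairs : List (Int × String)) :
    ∀ (l : List String), (∀ pc ∈ pairs, 0 ≤ pc.1) →
    bScatter (x :: l) (pairs.map (fun pc => (pc.1 + 1, pc.2))) = x :: bScatter l pairs := by
  induction pairs with
  | nil => intro l _; simp [bScatter]
  | cons pc rest ih =>
    intro l h
    simp only [List.map_cons, bScatter, List.foldl_cons]
    rw [pySetD_cons_succ _ _ _ _ (h pc (by simp))]
    exact ih _ (fun q hq => h q (by simp [hq]))

lemma enumerate_shift (xs : List String) : ∀ s : Int,
    PySem.List.enumerate xs (s + 1) = (PySem.List.enumerate xs s).map (fun p => (p.1 + 1, p.2)) := by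
  induction xs with
  | nil => intro s; simp [PySem.List.enumerate_nil]
  | cons x r ih =>
    intro s
    rw [PySem.List.enumerate_cons, PySem.List.enumerate_cons, ih (s + 1)]
    simp

lemma enumerate_pos_nonneg (xs : List String) (p : Int × String)
    (hp : p ∈ PySem.List.enumerate xs 0) : 0 ≤ p.1 := by
  rcases (PySem.List.mem_enumerate_iff xs 0 p).1 hp with ⟨k, hk, rfl⟩
  simp

-- core: B's scatter-by-positions equals the interleaving walk
lemma bScatter_nil (l : List String) : bScatter l [] = l := rfl

lemma bScatter_cons (l : List String) (pc : Int × String) (rest : List (Int × String)) :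
    bScatter l (pc :: rest) = bScatter (PySem.List.pySetD l pc.1 pc.2) rest := rfl

lemma b_eq_interleave (sexes : List String) : ∀ (mc fc : List String),
    bScatter (bScatter (List.replicate sexes.length "")
        ((((PySem.List.enumerate sexes 0).filter (fun p => p.2 == "male")).map Prod.fst).zip mc))
      ((((PySem.List.enumerate sexes 0).filter (fun p => p.2 != "male")).map Prod.fst).zip fc)
    = interleave sexes mc fc := by
  induction sexes with
  | nil => intro mc fc; simp [PySem.List.enumerate_nil, bScatter, interleave]
  | cons s r ih =>
    intro mc fc
    have hshift : PySem.List.enumerate r 1 = (PySem.List.enumerate r 0).map (fun p => (p.1 + 1, p.2)) := by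
      have h := enumerate_shift r 0
      norm_num at h
      exact h
    have hz : ∀ (ps : List Int) (cs : List String) (l : List String),
        (∀ p ∈ ps, 0 ≤ p) → ∀ x : String,
        bScatter (x :: l) (((ps.map (· + 1)).zip cs)) = x :: bScatter l (ps.zip cs) := by
      intro ps cs l hps x
      rw [List.zip_map_left]
      have : (Prod.map (fun p : Int => p + 1) (id : String → String)) =
          (fun pc : Int × String => (pc.1 + 1, pc.2)) := by funext pc; simp [Prod.map]
      rw [this]
      refine bScatter_shift x _ l ?_
      rintro ⟨p, c⟩ hpc
      exact hps p (List.of_mem_zip hpc).1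
    have hnn : ∀ (pf : (Int × String) → Bool) (p : Int),
        p ∈ ((PySem.List.enumerate r 0).filter pf).map Prod.fst → 0 ≤ p := by
      intro pf p hp
      rcases List.mem_map.1 hp with ⟨q, hq, rfl⟩
      exact enumerate_pos_nonneg r q (List.mem_filter.1 hq).1
    rw [PySem.List.enumerate_cons]
    norm_num
    rw [hshift]
    have hfm : ∀ (pred : String → Bool),
        (((PySem.List.enumerate r 0).map (fun p => (p.1 + 1, p.2))).filter (fun q => pred q.2)).map Prod.fst
        = (((PySem.List.enumerate r 0).filter (fun q => pred q.2)).map Prod.fst).map (· + 1) := by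
      intro pred
      rw [List.filter_map, List.map_map, List.map_map]
      rfl
    have h0 : ∀ (c : String) (l : List String),
        PySem.List.pySetD ((""  : String) :: l) (0 : Int) c = c :: l := by
      intro c l
      rw [PySem.List.pySetD_of_nonneg _ _ (by norm_num)]; rfl
    by_cases hs : s == "male"
    · have hs' : (s != "male") = false := by simp_all
      simp only [List.filter_cons, hs, hs', if_pos, if_neg, Bool.false_eq_true, not_false_iff,
        List.map_cons, List.replicate_succ]
      simp only [hfm (fun x => x == "male"), hfm (fun x => x != "male")]
      cases mc with
      | nil =>
        simp only [List.zip_nil_right, bScatter_nil]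
        rw [hz _ fc _ (hnn _) ""]
        have h := ih [] fc
        simp only [List.zip_nil_right, bScatter_nil] at h
        rw [h]
        simp [interleave, hs]
      | cons c mc' =>
        simp only [List.zip_cons_cons, bScatter_cons, h0]
        rw [hz _ mc' _ (hnn _) c, hz _ fc _ (hnn _) c, ih mc' fc]
        simp [interleave, hs]
    · have hs' : (s != "male") = true := by simp_all
      simp only [List.filter_cons, hs, hs', if_pos, if_neg, Bool.false_eq_true, not_false_iff,
        List.map_cons, List.replicate_succ]
      simp only [hfm (fun x => x == "male"), hfm (fun x => x != "male")]
      rw [hz _ mc _ (hnn _) ""]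
      cases fc with
      | nil =>
        simp only [List.zip_nil_right, bScatter_nil]
        have h := ih mc []
        simp only [List.zip_nil_right, bScatter_nil] at h
        rw [h]
        simp [interleave, hs]
      | cons c fc' =>
        simp only [List.zip_cons_cons, bScatter_cons, h0]
        rw [hz _ fc' _ (hnn _) c, ih mc fc']
        simp [interleave, hs]

-- ===== VERDICT (by name: the statement is the Claim_ definition above) =====
theorem choose_animal_colors_spec : Claim_equal_choose_animal_colors := by
  intro e v _ _
  unfold Spec_choose_animal_colors choose_animal_colors choose_animal_colors_alt
  rw [a_fold_eq, b_eq_interleave]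
  simp
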